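-- pv_equiv track=rewrite | github.com/eugenepretorius/compressingit | pytest/compress_duplicator.py | decoder_duplicates
-- ===== SOURCE A (Python) =====
-- def decoder_duplicates(data):
--     x = []
--     _skip = False
--     for i, v in enumerate(data):
--         if _skip:
--             _skip = False
--             continue
--
--         if i + 1 < len(data):
--             v_next = data[i+1]
--         else:
--             v_next = -1
--
--         if v >= 128:
--             x.append(v - 128)
--             if v_next != -1 and v_next < 128:
--                 for j in range(0, v_next+1):
--                     x.append(v - 128)
--                 _skip = True
--             else:
--                 x.append(v - 128)
--         else:
--             x.append(v)
--
--     return x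
-- ===== SOURCE B (Python) =====
-- def decoder_duplicates(data):
--     # pass 1: tokenize the stream into (value, count) pairs
--     tokens = []
--     i = 0
--     while i < len(data):
--         v = data[i]
--         if v >= 128 and i + 1 < len(data) and data[i + 1] < 128:
--             tokens.append((v - 128, data[i + 1] + 2))
--             i += 2
--         elif v >= 128:
--             tokens.append((v - 128, 2))
--             i += 1
--         else:
--             tokens.append((v, 1))
--             i += 1
--     # pass 2: expand each token
--     out = []
--     for val, cnt in tokens:
--         out += [val] * cnt
--     return out
-- ===== Notes on version B (the rewrite author's own statement) =====
-- stated objective: alternative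
-- what changed: A's single enumerate-loop with a skip flag and an inner per-copy append loop is replaced by a two-pass decomposition: tokenize the stream into (value, count) pairs, then expand each token with list multiplication.
-- intended difference: On streams where a marker byte (>=128) is immediately followed by a negative byte, A treats -1 as its internal end-of-stream sentinel (emitting two copies and re-reading the -1 as a literal) and its range() clamps other negative counts to a single copy, while B reads the byte after a marker uniformly as a count and emits count+2 copies (none when that is <= 0); the uniform reading is the intended decode, since real byte streams have no negative bytes and A's values there are artefacts of its sentinel and of range(). — e.g. on decoder_duplicates([130, -1]): A returns [2, 2, -1], B returns [2]
import Mathlib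
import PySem

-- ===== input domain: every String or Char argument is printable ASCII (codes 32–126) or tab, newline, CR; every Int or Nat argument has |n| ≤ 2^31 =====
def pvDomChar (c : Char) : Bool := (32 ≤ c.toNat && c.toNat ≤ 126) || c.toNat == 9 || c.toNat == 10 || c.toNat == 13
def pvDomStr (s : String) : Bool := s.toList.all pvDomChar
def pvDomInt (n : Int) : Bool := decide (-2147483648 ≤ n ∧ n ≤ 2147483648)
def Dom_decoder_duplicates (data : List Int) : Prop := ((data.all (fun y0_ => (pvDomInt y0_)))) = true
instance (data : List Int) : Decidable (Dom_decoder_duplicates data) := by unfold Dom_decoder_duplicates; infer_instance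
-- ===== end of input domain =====

-- B re-decomposes A's single skip-flag loop into two passes — tokenize into (value, count)
-- pairs, then expand each token (objective: alternative); on marker bytes followed by a
-- NEGATIVE byte the two differ as stated in D_ below.

-- ===== PORT A =====
-- one loop step of A's `for i, v in enumerate(data)` with state (x, _skip)
def decoderStepA (data : List Int) (st : List Int × Bool) (iv : Int × Int) : List Int × Bool :=
  if st.2 then (st.1, false)
  else
    let i := iv.1
    let v := iv.2
    -- data[i+1]: the branch guarantees i+1 in range, so pyGetD is exact here
    let v_next : Int := if i + 1 < (data.length : Int) then PySem.List.pyGetD data (i + 1) 0 else -1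
    if v ≥ 128 then
      let x := st.1 ++ [v - 128]
      if v_next ≠ -1 ∧ v_next < 128 then
        -- for j in range(0, v_next+1): x.append(v - 128)
        ((PySem.List.pyRange 0 (v_next + 1) 1).foldl (fun x _ => x ++ [v - 128]) x, true)
      else
        (x ++ [v - 128], false)
    else
      (st.1 ++ [v], false)

def decoder_duplicates (data : List Int) : List Int :=
  ((PySem.List.enumerate data 0).foldl (decoderStepA data) ([], false)).1

-- ===== PORT B =====
-- pass 1 of Source B: the while-loop over index i, as structural recursion on the remaining suffix
def decoderTokensB : List Int → List (Int × Int)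
  | [] => []
  | v :: rest =>
    if v ≥ 128 then
      match rest with
      | [] => [(v - 128, 2)]
      | w :: rest' =>
        if w < 128 then (v - 128, w + 2) :: decoderTokensB rest'
        else (v - 128, 2) :: decoderTokensB (w :: rest')
    else (v, 1) :: decoderTokensB rest

def decoder_duplicates_alt (data : List Int) : List Int :=
  -- pass 2 of Source B: out += [val] * cnt
  (decoderTokensB data).foldl (fun out t => out ++ List.replicate t.2.toNat t.1) []

-- ===== PRECONDITION & SPEC =====
-- On streams where a marker byte (≥ 128) is immediately followed by a NEGATIVE byte, A treats
-- -1 as its internal end-of-stream sentinel (emitting two copies and then re-reading the -1 as a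
-- literal) and its range() silently clamps other negative repeat counts to a single copy; B reads
-- the byte after a marker uniformly as a count, emitting count+2 copies (none when that is ≤ 0) —
-- the uniform reading is the intended decode, since A's values there are artefacts of its
-- sentinel and of range() (a real byte stream has no negative bytes).
def pvHasBadPair : List Int → Bool
  | v :: w :: rest => (decide (128 ≤ v) && decide (w < 0)) || pvHasBadPair (w :: rest)
  | _ => false

def D_decoder_duplicates (data : List Int) : Prop := pvHasBadPair data = true
instance (data : List Int) : Decidable (D_decoder_duplicates data) := by unfold D_decoder_duplicates; infer_instance

def Spec_decoder_duplicates (data : List Int) (out : List Int) : Prop := ¬ D_decoder_duplicates data → out = decoder_duplicates_alt data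
instance (data : List Int) (out : List Int) : Decidable (Spec_decoder_duplicates data out) := by unfold Spec_decoder_duplicates; infer_instance

def pvDiffWitness_decoder_duplicates : List Int := [130, -1]
def pvDiffWitnessOut_decoder_duplicates : (List Int) × (List Int) := ([2, 2, -1], [2])

-- ===== CLAIM (what is proved, stated in full; the proofs are below) =====
def Claim_unchanged_decoder_duplicates : Prop := ∀ (data : List Int), Dom_decoder_duplicates data → Spec_decoder_duplicates data (decoder_duplicates data)
def Claim_changed_decoder_duplicates : Prop := Dom_decoder_duplicates (pvDiffWitness_decoder_duplicates) ∧ D_decoder_duplicates (pvDiffWitness_decoder_duplicates) ∧ decoder_duplicates (pvDiffWitness_decoder_duplicates) = pvDiffWitnessOut_decoder_duplicates.1 ∧ decoder_duplicates_alt (pvDiffWitness_decoder_duplicates) = pvDiffWitnessOut_decoder_duplicates.2 ∧ pvDiffWitnessOut_decoder_duplicates.1 ≠ pvDiffWitnessOut_decoder_duplicates.2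
def Claim_exact_decoder_duplicates : Prop := ∀ (data : List Int), Dom_decoder_duplicates data → D_decoder_duplicates data → decoder_duplicates data ≠ decoder_duplicates_alt data

-- ===== LEMMAS AND PROOFS =====

-- A's result written as a plain structural recursion (same case analysis as A's loop)
def decA : List Int → List Int
  | [] => []
  | v :: rest =>
    if v ≥ 128 then
      match rest with
      | [] => [v - 128, v - 128]
      | w :: rest' =>
        if w ≠ -1 ∧ w < 128 then
          ((v - 128) :: List.replicate (w + 1).toNat (v - 128)) ++ decA rest'
        else
          [v - 128, v - 128] ++ decA (w :: rest')
    else v :: decA rest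

-- B's result written as a plain structural recursion (tokens expanded by flatMap)
theorem decoder_alt_eq_flatMap (data : List Int) :
    decoder_duplicates_alt data
      = (decoderTokensB data).flatMap (fun t => List.replicate t.2.toNat t.1) := by
  unfold decoder_duplicates_alt
  rw [PySem.List.foldl_append_eq_flatMap]
  simp

-- data[i+1] where data = pre ++ v :: w :: rest and i = pre.length: the lookahead byte is w
theorem pyGetD_lookahead (pre : List Int) (v w : Int) (rest : List Int) :
    PySem.List.pyGetD (pre ++ v :: w :: rest) ((pre.length : Int) + 1) 0 = w := by
  have h : ((pre.length : Int) + 1) = (((pre ++ [v]).length : Nat) : Int) := by simp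
  have h2 : pre ++ v :: w :: rest = (pre ++ [v]) ++ w :: rest := by simp
  rw [h, h2, PySem.List.pyGetD_natCast]
  simp [List.getD_eq_getElem?_getD]

-- loop invariant: A's fold over the suffix `l` of `data = pre ++ l`, started with
-- skip = false and accumulator acc, produces acc ++ decA l
theorem decoder_loop_eq (l : List Int) : ∀ (pre acc : List Int),
    ((PySem.List.enumerate l (pre.length : Int)).foldl (decoderStepA (pre ++ l)) (acc, false)).1
      = acc ++ decA l := by
  induction l using decA.induct with
  | case1 => intro pre acc; simp [PySem.List.enumerate_nil, decA]
  | case2 v hv =>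
    intro pre acc
    have hnot : ¬((pre.length : Int) + 1 < ((pre ++ [v]).length : Int)) := by
      simp only [List.length_append, List.length_cons, List.length_nil]; omega
    simp only [PySem.List.enumerate_cons, PySem.List.enumerate_nil, List.foldl_cons,
      List.foldl_nil, decoderStepA, decA]
    rw [if_neg hnot]
    simp [hv]
  | case3 v hv w rest hw ih =>
    intro pre acc
    have hlt : ((pre.length : Int) + 1 < ((pre ++ v :: w :: rest).length : Int)) := by
      simp only [List.length_append, List.length_cons]; omega
    have hget := pyGetD_lookahead pre v w rest
    simp only [PySem.List.enumerate_cons, List.foldl_cons]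
    have step1 : decoderStepA (pre ++ v :: w :: rest) (acc, false) ((pre.length : Int), v)
        = (acc ++ [v - 128] ++ List.replicate (w + 1).toNat (v - 128), true) := by
      simp only [decoderStepA]
      rw [if_pos hlt, hget]
      simp [hv, hw, PySem.List.length_pyRange_one]
    rw [step1]
    have step2 : decoderStepA (pre ++ v :: w :: rest)
        (acc ++ [v - 128] ++ List.replicate (w + 1).toNat (v - 128), true) ((pre.length : Int) + 1, w)
        = (acc ++ [v - 128] ++ List.replicate (w + 1).toNat (v - 128), false) := by
      simp [decoderStepA]
    rw [step2]
    have e1 : pre ++ v :: w :: rest = (pre ++ [v, w]) ++ rest := by simp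
    have e2 : (pre.length : Int) + 1 + 1 = (((pre ++ [v, w]).length : Nat) : Int) := by
      simp only [List.length_append, List.length_cons, List.length_nil]; push_cast; ring
    rw [e1, e2, ih]
    simp [decA, hv, hw]
  | case4 v hv w rest hw ih =>
    intro pre acc
    have hlt : ((pre.length : Int) + 1 < ((pre ++ v :: w :: rest).length : Int)) := by
      simp only [List.length_append, List.length_cons]; omega
    have hget := pyGetD_lookahead pre v w rest
    simp only [PySem.List.enumerate_cons, List.foldl_cons]
    have step1 : decoderStepA (pre ++ v :: w :: rest) (acc, false) ((pre.length : Int), v)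
        = (acc ++ [v - 128] ++ [v - 128], false) := by
      simp only [decoderStepA]
      rw [if_pos hlt, hget]
      simp [hv, hw]
    rw [step1]
    have e1 : pre ++ v :: w :: rest = (pre ++ [v]) ++ w :: rest := by simp
    have e2 : (pre.length : Int) + 1 = (((pre ++ [v]).length : Nat) : Int) := by simp
    rw [e1, e2, ← List.foldl_cons, ← PySem.List.enumerate_cons, ih]
    have : decA (v :: w :: rest) = [v - 128, v - 128] ++ decA (w :: rest) := by
      rw [decA.eq_def]; simp [hv, hw]
    rw [this]; simp
  | case5 v rest hv ih =>
    intro pre acc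
    simp only [PySem.List.enumerate_cons, List.foldl_cons]
    have step1 : decoderStepA (pre ++ v :: rest) (acc, false) ((pre.length : Int), v)
        = (acc ++ [v], false) := by
      simp [decoderStepA, hv]
    rw [step1]
    have e1 : pre ++ v :: rest = (pre ++ [v]) ++ rest := by simp
    have e2 : (pre.length : Int) + 1 = (((pre ++ [v]).length : Nat) : Int) := by simp
    rw [e1, e2, ih]
    have : decA (v :: rest) = v :: decA rest := by rw [decA.eq_def]; simp [hv]
    rw [this]; simp

theorem decoder_eq_decA (data : List Int) : decoder_duplicates data = decA data := by
  unfold decoder_duplicates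
  simpa using decoder_loop_eq data [] []

-- abbreviation for B's expansion
def decB (l : List Int) : List Int :=
  (decoderTokensB l).flatMap (fun t => List.replicate t.2.toNat t.1)

theorem decB_cons_low (v : Int) (rest : List Int) (hv : ¬ v ≥ 128) :
    decB (v :: rest) = v :: decB rest := by
  unfold decB
  rw [decoderTokensB.eq_def]
  simp [hv]

theorem decB_cons_high_count (v w : Int) (rest : List Int) (hv : v ≥ 128) (hw : w < 128) :
    decB (v :: w :: rest) = List.replicate (w + 2).toNat (v - 128) ++ decB rest := by
  unfold decB
  rw [decoderTokensB.eq_def]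
  simp [hv, hw]

theorem decB_cons_high_high (v w : Int) (rest : List Int) (hv : v ≥ 128) (hw : ¬ w < 128) :
    decB (v :: w :: rest) = (v - 128) :: (v - 128) :: decB (w :: rest) := by
  unfold decB
  rw [decoderTokensB.eq_def]
  simp [hv, hw]

-- outside D_: no marker byte is followed by a negative byte, and the two recursions agree
theorem decA_eq_decB_of_noBad (l : List Int) (h : pvHasBadPair l = false) :
    decA l = decB l := by
  induction l using decA.induct with
  | case1 => simp [decA, decB, decoderTokensB]
  | case2 v hv =>
    rw [decA.eq_def]
    unfold decB
    rw [decoderTokensB.eq_def]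
    simp [hv]
  | case3 v hv w rest hw ih =>
    have hwpos : 0 ≤ w := by
      rw [pvHasBadPair.eq_def] at h
      simp only [Bool.or_eq_false_iff, Bool.and_eq_false_iff] at h
      rcases h.1 with h1 | h1
      · exact absurd hv (by simpa using h1)
      · simpa using h1
    have hrest : pvHasBadPair rest = false := by
      rw [pvHasBadPair.eq_def] at h
      simp only [Bool.or_eq_false_iff] at h
      cases rest with
      | nil => rfl
      | cons a t =>
        rw [pvHasBadPair.eq_def] at h
        simp only [Bool.or_eq_false_iff] at h
        exact h.2.2
    have hA : decA (v :: w :: rest)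
        = ((v - 128) :: List.replicate (w + 1).toNat (v - 128)) ++ decA rest := by
      rw [decA.eq_def]; simp [hv, hw]
    rw [hA, decB_cons_high_count v w rest hv hw.2, ih hrest]
    have h2 : (w + 2).toNat = (w + 1).toNat + 1 := by omega
    rw [h2, List.replicate_succ]
  | case4 v hv w rest hw ih =>
    -- ¬(w ≠ -1 ∧ w < 128) and no bad pair forces 128 ≤ w
    have hwd : ¬ w < 128 := by
      rw [pvHasBadPair.eq_def] at h
      simp only [Bool.or_eq_false_iff, Bool.and_eq_false_iff] at h
      intro hlt
      rcases h.1 with h1 | h1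
      · exact absurd hv (by simpa using h1)
      · have : 0 ≤ w := by simpa using h1
        exact hw ⟨by omega, hlt⟩
    have hrest : pvHasBadPair (w :: rest) = false := by
      rw [pvHasBadPair.eq_def] at h
      simp only [Bool.or_eq_false_iff] at h
      exact h.2
    have hA : decA (v :: w :: rest) = [v - 128, v - 128] ++ decA (w :: rest) := by
      rw [decA.eq_def]; simp [hv, hw]
    rw [hA, decB_cons_high_high v w rest hv hwd, ih hrest]
    rfl
  | case5 v rest hv ih =>
    have hrest : pvHasBadPair rest = false := by
      cases rest with
      | nil => rfl
      | cons a t =>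
        rw [pvHasBadPair.eq_def] at h
        simp only [Bool.or_eq_false_iff] at h
        exact h.2
    have hA : decA (v :: rest) = v :: decA rest := by rw [decA.eq_def]; simp [hv]
    rw [hA, decB_cons_low v rest hv, ih hrest]

-- length comparison: B never produces more than A …
theorem decB_len_le (l : List Int) : (decB l).length ≤ (decA l).length := by
  induction l using decoderTokensB.induct with
  | case1 => simp [decA, decB, decoderTokensB]
  | case2 v hv =>
    rw [decA.eq_def]
    unfold decB; rw [decoderTokensB.eq_def]; simp [hv]
  | case3 v hv w rest hw ih =>
    have hB := decB_cons_high_count v w rest hv hw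
    by_cases hwm1 : w = -1
    · have hA : decA (v :: w :: rest) = [v - 128, v - 128] ++ decA (w :: rest) := by
        rw [decA.eq_def]; simp [hv, hwm1]
      have hA2 : decA (w :: rest) = w :: decA rest := by
        rw [decA.eq_def]; simp [show ¬ w ≥ 128 by omega]
      rw [hA, hA2, hB]
      simp only [List.length_append, List.length_cons, List.length_replicate]
      have : (w + 2).toNat = 1 := by omega
      omega
    · have hA : decA (v :: w :: rest)
          = ((v - 128) :: List.replicate (w + 1).toNat (v - 128)) ++ decA rest := by
        rw [decA.eq_def]; simp [hv, hwm1, hw]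
      rw [hA, hB]
      simp only [List.length_append, List.length_cons, List.length_replicate]
      have : (w + 2).toNat ≤ (w + 1).toNat + 1 := by omega
      omega
  | case4 v hv w rest hw ih =>
    have hA : decA (v :: w :: rest) = [v - 128, v - 128] ++ decA (w :: rest) := by
      rw [decA.eq_def]; simp [hv, hw]
    rw [hA, decB_cons_high_high v w rest hv hw]
    simpa using ih
  | case5 v rest hv ih =>
    have hA : decA (v :: rest) = v :: decA rest := by rw [decA.eq_def]; simp [hv]
    rw [hA, decB_cons_low v rest hv]
    simpa using ih

-- … and strictly less as soon as some marker byte is followed by a negative byte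
theorem decB_len_lt (l : List Int) (hbad : pvHasBadPair l = true) :
    (decB l).length < (decA l).length := by
  induction l using decoderTokensB.induct with
  | case1 => rw [pvHasBadPair.eq_def] at hbad; simp at hbad
  | case2 v hv => rw [pvHasBadPair.eq_def] at hbad; simp at hbad
  | case3 v hv w rest hw ih =>
    have hB := decB_cons_high_count v w rest hv hw
    by_cases hwm1 : w = -1
    · -- A emits two copies then re-reads the -1 as a literal; B emits one copy
      have hA : decA (v :: w :: rest) = [v - 128, v - 128] ++ decA (w :: rest) := by
        rw [decA.eq_def]; simp [hv, hwm1]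
      have hA2 : decA (w :: rest) = w :: decA rest := by
        rw [decA.eq_def]; simp [show ¬ w ≥ 128 by omega]
      have hle := decB_len_le rest
      rw [hA, hA2, hB]
      simp only [List.length_append, List.length_cons, List.length_replicate]
      have : (w + 2).toNat = 1 := by omega
      omega
    · have hA : decA (v :: w :: rest)
          = ((v - 128) :: List.replicate (w + 1).toNat (v - 128)) ++ decA rest := by
        rw [decA.eq_def]; simp [hv, hwm1, hw]
      rw [hA, hB]
      simp only [List.length_append, List.length_cons, List.length_replicate]
      by_cases hwneg : w < 0
      · -- w ≤ -2: A emits one copy, B none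
        have hle := decB_len_le rest
        have : (w + 2).toNat < (w + 1).toNat + 1 := by omega
        omega
      · -- the bad pair lies further right
        have hrest : pvHasBadPair rest = true := by
          rw [pvHasBadPair.eq_def] at hbad
          simp only [Bool.or_eq_true, Bool.and_eq_true, decide_eq_true_eq] at hbad
          rcases hbad with ⟨_, h1⟩ | h1
          · omega
          · cases rest with
            | nil => simp [pvHasBadPair] at h1
            | cons a t =>
              rw [pvHasBadPair.eq_def] at h1
              simp only [Bool.or_eq_true, Bool.and_eq_true, decide_eq_true_eq] at h1
              rcases h1 with ⟨h2, _⟩ | h2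
              · omega
              · exact h2
        have := ih hrest
        have : (w + 2).toNat ≤ (w + 1).toNat + 1 := by omega
        omega
  | case4 v hv w rest hw ih =>
    have hA : decA (v :: w :: rest) = [v - 128, v - 128] ++ decA (w :: rest) := by
      rw [decA.eq_def]; simp [hv, hw]
    have hrest : pvHasBadPair (w :: rest) = true := by
      rw [pvHasBadPair.eq_def] at hbad
      simp only [Bool.or_eq_true, Bool.and_eq_true, decide_eq_true_eq] at hbad
      rcases hbad with ⟨_, h1⟩ | h1
      · omega
      · exact h1
    rw [hA, decB_cons_high_high v w rest hv hw]
    simpa using ih hrest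
  | case5 v rest hv ih =>
    have hA : decA (v :: rest) = v :: decA rest := by rw [decA.eq_def]; simp [hv]
    have hrest : pvHasBadPair rest = true := by
      cases rest with
      | nil => simp [pvHasBadPair] at hbad
      | cons a t =>
        rw [pvHasBadPair.eq_def] at hbad
        simp only [Bool.or_eq_true, Bool.and_eq_true, decide_eq_true_eq] at hbad
        rcases hbad with ⟨h1, _⟩ | h1
        · omega
        · exact h1
    rw [hA, decB_cons_low v rest hv]
    simpa using ih hrest

-- ===== VERDICT (by name: the statements are the Claim_ definitions above) =====
theorem decoder_duplicates_spec : Claim_unchanged_decoder_duplicates := by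
  intro data _ hnd
  rw [decoder_eq_decA, decoder_alt_eq_flatMap]
  exact decA_eq_decB_of_noBad data (by
    unfold D_decoder_duplicates at hnd
    exact Bool.eq_false_iff.mpr (by simpa using hnd))

theorem decoder_duplicates_changed : Claim_changed_decoder_duplicates := by
  unfold Claim_changed_decoder_duplicates; decide

theorem decoder_duplicates_tight : Claim_exact_decoder_duplicates := by
  intro data _ hd hEq
  have hlt := decB_len_lt data hd
  have hEq2 : decA data = decB data := by
    rw [← decoder_eq_decA, hEq, decoder_alt_eq_flatMap]; rfl
  rw [hEq2] at hlt
  exact lt_irrefl _ hlt
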